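-- pv_equiv track=rewrite | github.com/yamwise/python-samples | main.py | simpleerror
-- ===== SOURCE A (Python) =====
-- def linenumber(error):
--     counter = 0
--     for i in range(len(error)):
--         if counter == 2:
--             final = ''
--             for x in error[i:]:
--                 if x != ':':
--                     final += x
--                 else:
--                     return str(final)
--         if error[i] == ':':
--             counter += 1
--
-- def simpleerror(error):
--     errors = []
--
--     linenum = linenumber(error)
--     if "expected ';'" in error:
--         errors.append("You forgot a semicolon on line " +
--                       linenum + "! Keep going champ!")
--
--     final = 'You had ' + str(len(errors)) + ' errors!\n\n'
--
--     for i in range(len(errors)):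
--         final += 'Here is error number ' + str(i + 1) + ': '
--         final += errors[i]
--         final += '\n'
--     return final
-- ===== SOURCE B (Python) =====
-- def simpleerror(error):
--     if "expected ';'" not in error:
--         return 'You had 0 errors!\n\n'
--     linenum = error.split(':')[2]
--     return ('You had 1 errors!\n\n'
--             'Here is error number 1: You forgot a semicolon on line '
--             + linenum + '! Keep going champ!\n')
-- ===== Notes on version B (the rewrite author's own statement) =====
-- stated objective: simpler
-- what changed: B replaces A's two-nested-loop character state machine for the line number with a single split(':')[2] and replaces the errors-list plus index-loop assembly with two direct string returns (the errors list can only ever hold 0 or 1 messages).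
-- outside the precondition, e.g. on simpleerror("expected ';'"): A raises TypeError, B raises IndexError
import Mathlib
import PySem

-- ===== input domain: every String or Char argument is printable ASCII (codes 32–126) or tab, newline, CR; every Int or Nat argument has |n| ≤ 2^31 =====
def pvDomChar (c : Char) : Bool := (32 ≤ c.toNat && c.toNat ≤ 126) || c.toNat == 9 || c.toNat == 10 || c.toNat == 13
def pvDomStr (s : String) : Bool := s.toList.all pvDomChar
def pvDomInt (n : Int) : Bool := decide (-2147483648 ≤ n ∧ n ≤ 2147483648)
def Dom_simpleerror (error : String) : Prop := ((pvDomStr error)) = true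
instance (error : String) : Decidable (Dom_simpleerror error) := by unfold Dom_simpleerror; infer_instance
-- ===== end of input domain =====

-- B replaces A's nested-loop state machine for the line number with split(':')[2] and the
-- errors-list/index-loop assembly with two direct returns (objective: simpler).

-- ===== PORT A =====
-- inner loop of linenumber: "for x in error[i:]: final += x unless ':' (then return final)"
def pvInner : List Char → List Char → Option (List Char)
  | [], _ => none
  | x :: xs, acc => if x ≠ ':' then pvInner xs (acc ++ [x]) else some acc

-- outer loop "for i in range(len(error))" over the remaining suffix, carrying counter
def pvOuter : List Char → Nat → Option (List Char)
  | [], _ => none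
  | c :: rest, counter =>
    if counter = 2 then
      match pvInner (c :: rest) [] with
      | some s => some s
      | none => pvOuter rest (if c = ':' then counter + 1 else counter)
    else pvOuter rest (if c = ':' then counter + 1 else counter)

def pvLinenumber (error : String) : Option (List Char) := pvOuter error.toList 0

def simpleerror (error : String) : String :=
  let linenum := pvLinenumber error
  let errors : List (List Char) :=
    if PySem.Str.isIn "expected ';'" error then
      -- Python raises TypeError here when linenum is None ("str" + None); Pre_ excludes those inputs
      ["You forgot a semicolon on line ".toList ++ linenum.getD [] ++ "! Keep going champ!".toList]
    else []
  let final := "You had ".toList ++ PySem.Int.toChars errors.length ++ " errors!\n\n".toList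
  let final := (PySem.List.pyRange 0 errors.length 1).foldl
    (fun acc i => acc ++ "Here is error number ".toList ++ PySem.Int.toChars (i + 1)
      ++ ": ".toList ++ PySem.List.pyGetD errors i [] ++ ['\n']) final
  String.ofList final

-- ===== PORT B =====
def simpleerror_alt (error : String) : String :=
  if PySem.Str.isIn "expected ';'" error = false then
    String.ofList "You had 0 errors!\n\n".toList
  else
    -- Python raises IndexError here when split(':') has no index 2; Pre_ excludes those inputs
    let linenum := (PySem.Chars.splitOn error.toList [':'])[2]?.getD []
    String.ofList ("You had 1 errors!\n\nHere is error number 1: You forgot a semicolon on line ".toList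
      ++ linenum ++ "! Keep going champ!\n".toList)

-- ===== PRECONDITION & SPEC =====
-- Pre_ excludes exactly the inputs where A raises TypeError: the message "expected ';'" occurs
-- but there is no third colon, so linenumber returns None and "str" + None raises.
def Pre_simpleerror (error : String) : Prop :=
  PySem.Str.isIn "expected ';'" error = true → 3 ≤ error.toList.count ':'
instance (error : String) : Decidable (Pre_simpleerror error) := by unfold Pre_simpleerror; infer_instance

def pvWitness_simpleerror : String := "f.c:3:1: error: expected ';'"

def Spec_simpleerror (error : String) (out : String) : Prop := out = simpleerror_alt error
instance (error : String) (out : String) : Decidable (Spec_simpleerror error out) := by unfold Spec_simpleerror; infer_instance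

-- ===== CLAIM (what is proved, stated in full; the proofs are below) =====
def Claim_equal_simpleerror : Prop := ∀ (error : String), Dom_simpleerror error → Pre_simpleerror error → Spec_simpleerror error (simpleerror error)

-- ===== LEMMAS AND PROOFS =====

-- a fuel-free mirror of PySem.Chars.splitOn.go for a single-character separator
def pvSplitAux (c : Char) : List Char → List Char → List (List Char) → List (List Char)
  | [], cur, acc => (cur.reverse :: acc).reverse
  | x :: rest, cur, acc =>
    if x = c then pvSplitAux c rest [] (cur.reverse :: acc)
    else pvSplitAux c rest (x :: cur) acc

theorem pvSplitOn_go_eq (c : Char) :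
    ∀ (l : List Char) (f : Nat) (cur : List Char) (acc : List (List Char)),
      l.length ≤ f → PySem.Chars.splitOn.go [c] f l cur acc = pvSplitAux c l cur acc := by
  intro l
  induction l with
  | nil =>
    intro f cur acc _
    cases f <;> simp [PySem.Chars.splitOn.go, pvSplitAux]
  | cons x rest ih =>
    intro f cur acc hf
    cases f with
    | zero => simp at hf
    | succ f' =>
      simp only [List.length_cons, Nat.succ_le_succ_iff] at hf
      by_cases hx : x = c
      · subst hx
        simp [PySem.Chars.splitOn.go, pvSplitAux, List.isPrefixOf, ih f' _ _ hf]
      · have hcx : ¬ c = x := fun h => hx h.symm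
        simp [PySem.Chars.splitOn.go, pvSplitAux, List.isPrefixOf, hx, hcx, ih f' _ _ hf]

theorem pvSplitOn_eq (c : Char) (l : List Char) :
    PySem.Chars.splitOn l [c] = pvSplitAux c l [] [] := by
  unfold PySem.Chars.splitOn
  exact pvSplitOn_go_eq c l (l.length + 1) [] [] (Nat.le_succ _)

theorem pvSplitAux_skip (c : Char) (p : List Char) (hp : c ∉ p) :
    ∀ (t cur acc), pvSplitAux c (p ++ t) cur acc = pvSplitAux c t (p.reverse ++ cur) acc := by
  induction p with
  | nil => intro t cur acc; simp
  | cons x p' ih =>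
    intro t cur acc
    have hx : x ≠ c := fun h => hp (h ▸ List.mem_cons_self ..)
    have hp' : c ∉ p' := fun h => hp (List.mem_cons_of_mem _ h)
    simp [pvSplitAux, hx, ih hp', List.append_assoc]

theorem pvSplitAux_colon (c : Char) (t cur : List Char) (acc : List (List Char)) :
    pvSplitAux c (c :: t) cur acc = pvSplitAux c t [] (cur.reverse :: acc) := by
  simp [pvSplitAux]

theorem pvSplitAux_acc (c : Char) :
    ∀ (l cur acc), pvSplitAux c l cur acc = acc.reverse ++ pvSplitAux c l cur [] := by
  intro l
  induction l with
  | nil => intro cur acc; simp [pvSplitAux]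
  | cons x rest ih =>
    intro cur acc
    by_cases hx : x = c
    · simp only [pvSplitAux, if_pos hx]
      rw [ih [] (cur.reverse :: acc), ih [] [cur.reverse]]
      simp
    · simp only [pvSplitAux, if_neg hx]
      rw [ih (x :: cur) acc]

-- decompose a list at its first occurrence of c
theorem pv_first_colon {c : Char} {l : List Char} (h : c ∈ l) :
    ∃ p t, l = p ++ c :: t ∧ c ∉ p ∧ l.count c = t.count c + 1 := by
  induction l with
  | nil => simp at h
  | cons x rest ih =>
    by_cases hx : x = c
    · subst hx
      exact ⟨[], rest, by simp, by simp, by simp⟩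
    · have hm : c ∈ rest := by
        rcases List.mem_cons.mp h with h1 | h1
        · exact absurd h1.symm hx
        · exact h1
      obtain ⟨p, t, hl, hpc, hcount⟩ := ih hm
      refine ⟨x :: p, t, by simp [hl], ?_, ?_⟩
      · intro hmem
        rcases List.mem_cons.mp hmem with h1 | h1
        · exact hx h1.symm
        · exact hpc h1
      · simp [hx, hcount]

theorem pvInner_colon (p : List Char) (hp : ':' ∉ p) :
    ∀ (t acc), pvInner (p ++ ':' :: t) acc = some (acc ++ p) := by
  induction p with
  | nil => intro t acc; simp [pvInner]
  | cons x p' ih =>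
    intro t acc
    have hx : x ≠ ':' := fun h => hp (h ▸ List.mem_cons_self ..)
    have hp' : ':' ∉ p' := fun h => hp (List.mem_cons_of_mem _ h)
    simp [pvInner, hx, ih hp', List.append_assoc]

-- A's outer loop at counter 2 returns the prefix of the remainder up to its first colon
theorem pvOuter_two (p t : List Char) (hp : ':' ∉ p) :
    pvOuter (p ++ ':' :: t) 2 = some p := by
  cases hq : p ++ ':' :: t with
  | nil => exact absurd hq (by simp)
  | cons c rest =>
    have : pvInner (c :: rest) [] = some p := by rw [← hq]; simpa using pvInner_colon p hp t []
    simp [pvOuter, this]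

-- A's outer loop below counter 2 skips up to the next colon and increments
theorem pvOuter_skip (p : List Char) (hp : ':' ∉ p) (k : Nat) (hk : k ≠ 2) :
    ∀ t, pvOuter (p ++ ':' :: t) k = pvOuter t (k + 1) := by
  induction p with
  | nil => intro t; simp [pvOuter, hk]
  | cons x p' ih =>
    intro t
    have hx : x ≠ ':' := fun h => hp (h ▸ List.mem_cons_self ..)
    have hp' : ':' ∉ p' := fun h => hp (List.mem_cons_of_mem _ h)
    simp [pvOuter, hk, hx, ih hp']

-- the two line-number computations agree when the string has at least three colons
theorem pv_linenum_eq (l : List Char) (h : 3 ≤ l.count ':') :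
    ∃ p3, pvOuter l 0 = some p3 ∧ (PySem.Chars.splitOn l [':'])[2]? = some p3 := by
  have h1 : ':' ∈ l := List.count_pos_iff.mp (by omega)
  obtain ⟨p1, t1, hl1, hc1, hn1⟩ := pv_first_colon h1
  have h2 : ':' ∈ t1 := List.count_pos_iff.mp (by omega)
  obtain ⟨p2, t2, hl2, hc2, hn2⟩ := pv_first_colon h2
  have h3 : ':' ∈ t2 := List.count_pos_iff.mp (by omega)
  obtain ⟨p3, t3, hl3, hc3, _⟩ := pv_first_colon h3
  refine ⟨p3, ?_, ?_⟩
  · rw [hl1, pvOuter_skip p1 hc1 0 (by omega), hl2, pvOuter_skip p2 hc2 1 (by omega),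
      hl3, pvOuter_two p3 t3 hc3]
  · rw [hl1, hl2, hl3, pvSplitOn_eq,
      pvSplitAux_skip ':' p1 hc1, pvSplitAux_colon,
      pvSplitAux_skip ':' p2 hc2, pvSplitAux_colon,
      pvSplitAux_skip ':' p3 hc3, pvSplitAux_colon,
      pvSplitAux_acc]
    simp

-- ===== VERDICT (by name: the statement is the Claim_ definition above) =====
theorem simpleerror_spec : Claim_equal_simpleerror := by
  intro error _ hpre
  unfold Spec_simpleerror simpleerror simpleerror_alt
  by_cases hin : PySem.Str.isIn "expected ';'" error = true
  · obtain ⟨p3, hA, hB⟩ := pv_linenum_eq error.toList (hpre hin)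
    simp only [hin, if_true, Bool.true_eq_false, if_false, pvLinenumber, hA, hB,
      Option.getD_some, List.length_cons, List.length_nil]
    simp only [Nat.zero_add, Nat.cast_one]
    rw [show PySem.List.pyRange 0 1 1 = [0] from by decide]
    simp only [List.foldl_cons, List.foldl_nil]
    rw [show PySem.Int.toChars ((0:Int) + 1) = ['1'] from by decide,
      show PySem.Int.toChars (1:Int) = ['1'] from by decide,
      show (PySem.List.pyGetD ["You forgot a semicolon on line ".toList ++ p3 ++ "! Keep going champ!".toList] 0 []) = "You forgot a semicolon on line ".toList ++ p3 ++ "! Keep going champ!".toList from rfl]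
    congr 1
    rw [show ("You had " : String).toList = ['Y', 'o', 'u', ' ', 'h', 'a', 'd', ' '] from by decide]
    rw [show (" errors!\n\n" : String).toList = [' ', 'e', 'r', 'r', 'o', 'r', 's', '!', '\n', '\n'] from by decide]
    rw [show ("Here is error number " : String).toList = ['H', 'e', 'r', 'e', ' ', 'i', 's', ' ', 'e', 'r', 'r', 'o', 'r', ' ', 'n', 'u', 'm', 'b', 'e', 'r', ' '] from by decide]
    rw [show (": " : String).toList = [':', ' '] from by decide]
    rw [show ("You forgot a semicolon on line " : String).toList = ['Y', 'o', 'u', ' ', 'f', 'o', 'r', 'g', 'o', 't', ' ', 'a', ' ', 's', 'e', 'm', 'i', 'c', 'o', 'l', 'o', 'n', ' ', 'o', 'n', ' ', 'l', 'i', 'n', 'e', ' '] from by decide]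
    rw [show ("! Keep going champ!" : String).toList = ['!', ' ', 'K', 'e', 'e', 'p', ' ', 'g', 'o', 'i', 'n', 'g', ' ', 'c', 'h', 'a', 'm', 'p', '!'] from by decide]
    rw [show ("You had 1 errors!\n\nHere is error number 1: You forgot a semicolon on line " : String).toList = ['Y', 'o', 'u', ' ', 'h', 'a', 'd', ' ', '1', ' ', 'e', 'r', 'r', 'o', 'r', 's', '!', '\n', '\n', 'H', 'e', 'r', 'e', ' ', 'i', 's', ' ', 'e', 'r', 'r', 'o', 'r', ' ', 'n', 'u', 'm', 'b', 'e', 'r', ' ', '1', ':', ' ', 'Y', 'o', 'u', ' ', 'f', 'o', 'r', 'g', 'o', 't', ' ', 'a', ' ', 's', 'e', 'm', 'i', 'c', 'o', 'l', 'o', 'n', ' ', 'o', 'n', ' ', 'l', 'i', 'n', 'e', ' '] from by decide]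
    rw [show ("! Keep going champ!\n" : String).toList = ['!', ' ', 'K', 'e', 'e', 'p', ' ', 'g', 'o', 'i', 'n', 'g', ' ', 'c', 'h', 'a', 'm', 'p', '!', '\n'] from by decide]
    simp
  · simp only [Bool.not_eq_true] at hin
    simp at hin
    simp [hin, PySem.List.pyRange, PySem.Int.toChars]
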